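-- pv_equiv track=rewrite | github.com/janmichael88/Leetcode_Monthly_Challenges | Dec_2021.py | canConvert
-- ===== SOURCE A (Python) =====
-- def canConvert(str1: str, str2: str) -> bool:
--     '''
--     the solution is kinda long winded so lets break this down in to parts
--     1. One to One Mapping:
--         if each char in str1 can map to str2, we can transfrom this with zero or more conversion
--     2. One to Many mapping
--         if chars in str1 are not different and one of the smae chars in str1 is mapped to another in str2
--     3. Linked List
--         if the mappings form a linked list, must be careful in the order we transform
--         by there is no cycle in this mapping, so still possible
--     4. Cylic Linked List
--         we need to break the cycle mapping in str1, which any char not in str1 and str2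
--     5. Multiple Linked Lists
--         we can break the cycle, so long as we have a unique char
--     6. Cylic Linked List with 26 letters
--         cannot do, beause we need ane extra char to brea the cycle
--     7. Linked List with 26 Letters and One Loop
--         say we have str1, containing all 26 unique lower case chars
--         says str2, only contains 25, we can still convert
--         why? two char from string 1 mapp to the sam char
--         we adopt greey stretgy and conver yh to z
--         the idea is to make these to chars (y and z) converted both to z
--     inution:
--         if str1 has 26 unique chars, it is still possible to convert str1 to str2
--         as long as str2 has less than 26 chars
--         SO, if str1 has 26 uique chard and str2 does not, there will always be a way to transform str1 into str2
--
--
--     '''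
--     if str1 == str2:
--         return True
--
--     conversion_mappings = dict()
--     unique_characters_in_str2 = set()
--
--     # Make sure that no character in str1 is mapped to multiple characters in str2.
--     for letter1, letter2 in zip(str1, str2):
--         if letter1 not in conversion_mappings:
--             conversion_mappings[letter1] = letter2
--             unique_characters_in_str2.add(letter2)
--         elif conversion_mappings[letter1] != letter2:
--             # letter1 maps to 2 different characters, so str1 cannot transform into str2.
--             return False
--
--
--     if len(unique_characters_in_str2) < 26:
--         # No character in str1 maps to 2 or more different characters in str2 and there
--         # is at least one temporary character that can be used to break any loops.
--         return True
--
--     # The conversion mapping forms one or more cycles and there are no temporary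
--     # characters that we can use to break the loops, so str1 cannot transform into str2.
--     return False
-- ===== SOURCE B (Python) =====
-- def canConvert(str1: str, str2: str) -> bool:
--     if str1 == str2:
--         return True
--     pairs = sorted(zip(str1, str2))
--     # after sorting, any source char mapped to two targets shows up as adjacent pairs
--     for p, q in zip(pairs, pairs[1:]):
--         if p[0] == q[0] and p[1] != q[1]:
--             return False
--     # count distinct targets by scanning the sorted target list
--     targets = sorted(b for _, b in pairs)
--     distinct = 0
--     prev = None
--     for b in targets:
--         if prev is None or b != prev:
--             distinct += 1
--         prev = b
--     return distinct < 26
-- ===== Notes on version B (the rewrite author's own statement) =====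
-- stated objective: alternative
-- what changed: Replaces A's single pass with a mutable first-seen dict and a target set by a sort-then-scan algorithm using no hash structures: sort the zipped pairs (lexicographically), detect a one-to-many mapping by comparing adjacent sorted pairs, then count distinct targets by a prev/counter scan over a sorted target list.
import Mathlib
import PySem

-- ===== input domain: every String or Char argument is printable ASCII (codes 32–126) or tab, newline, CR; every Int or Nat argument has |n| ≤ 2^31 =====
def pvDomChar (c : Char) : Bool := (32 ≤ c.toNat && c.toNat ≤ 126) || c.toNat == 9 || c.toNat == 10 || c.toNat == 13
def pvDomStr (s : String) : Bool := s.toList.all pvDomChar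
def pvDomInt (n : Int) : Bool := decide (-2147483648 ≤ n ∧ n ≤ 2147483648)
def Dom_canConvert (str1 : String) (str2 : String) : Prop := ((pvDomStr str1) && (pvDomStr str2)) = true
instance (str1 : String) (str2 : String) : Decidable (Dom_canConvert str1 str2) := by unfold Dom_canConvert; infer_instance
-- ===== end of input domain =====

-- B replaces A's one-pass dict/set bookkeeping by sort-then-scan: sort the zipped pairs and
-- detect one-to-many conflicts between ADJACENT pairs, then count distinct targets by scanning
-- a sorted target list; objective: alternative (no hash structures), not faster.

-- ===== PORT A =====
-- the for-loop over zip(str1, str2): conversion_mappings is the dict, uniq the set of targets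
def canConvertLoop : List (Char × Char) → PySem.Dict Char Char → PySem.Set Char → Bool
  | [], _, uniq => decide (PySem.Set.len uniq < 26)
  | (l1, l2) :: rest, conv, uniq =>
    match conv.get? l1 with
    | none   => canConvertLoop rest (conv.insert l1 l2) (PySem.Set.add uniq l2)
    | some c => if c ≠ l2 then false else canConvertLoop rest conv uniq

def canConvert (str1 : String) (str2 : String) : Bool :=
  if str1 == str2 then true
  else canConvertLoop (List.zip str1.toList str2.toList) PySem.Dict.empty PySem.Set.empty

-- ===== PORT B =====
-- Python's sorted(pairs) compares (c1, c2) tuples lexicographically by codepoint; since every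
-- codepoint is < 1114112, this injective Nat key realizes exactly that order (ties only between
-- equal pairs, so stability changes nothing): the sort is exact.
def pairKey (p : Char × Char) : Nat := p.1.toNat * 1114112 + p.2.toNat

-- 'for p, q in zip(pairs, pairs[1:]): if p[0] == q[0] and p[1] != q[1]: return False'
def adjConflict : List (Char × Char) → Bool
  | p :: q :: rest => if p.1 == q.1 && p.2 != q.2 then true else adjConflict (q :: rest)
  | _ => false

-- 'distinct = 0; prev = None; for b in targets: if prev is None or b != prev: distinct += 1; prev = b'
def countLoop : Int → Option Char → List Char → Int
  | d, _, [] => d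
  | d, prev, b :: rest => countLoop (if prev == some b then d else d + 1) (some b) rest

def canConvert_alt (str1 : String) (str2 : String) : Bool :=
  if str1 == str2 then true
  else
    let pairs := PySem.List.sorted (List.zip str1.toList str2.toList) pairKey false
    if adjConflict pairs then false
    else
      let targets := PySem.List.sorted (pairs.map Prod.snd) (fun b => b) false
      decide (countLoop 0 none targets < 26)

-- ===== PRECONDITION & SPEC =====
def Spec_canConvert (str1 : String) (str2 : String) (out : Bool) : Prop := out = canConvert_alt str1 str2
instance (str1 : String) (str2 : String) (out : Bool) : Decidable (Spec_canConvert str1 str2 out) := by unfold Spec_canConvert; infer_instance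

-- ===== CLAIM (what is proved, stated in full; the proofs are below) =====
def Claim_equal_canConvert : Prop := ∀ (str1 : String) (str2 : String), Dom_canConvert str1 str2 → Spec_canConvert str1 str2 (canConvert str1 str2)

-- ===== LEMMAS AND PROOFS =====

-- proof-only intermediate form of A's loop result (set-cardinality formulation)
def altCore (ps : List (Char × Char)) : Bool :=
  let pairs : PySem.Set (Char × Char) := PySem.Set.ofList ps
  if PySem.Set.len pairs ≠ PySem.Set.len (PySem.Set.ofList (pairs.map Prod.fst)) then false
  else decide (PySem.Set.len (PySem.Set.ofList (pairs.map Prod.snd)) < 26)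

-- proof-only: B's else-branch as a function of the raw pair list
def bCore (ps : List (Char × Char)) : Bool :=
  let pairs := PySem.List.sorted ps pairKey false
  if adjConflict pairs then false
  else decide (countLoop 0 none (PySem.List.sorted (pairs.map Prod.snd) (fun b => b) false) < 26)

-- 'the mapping is a function': no source char maps to two targets
def Func (ps : List (Char × Char)) : Prop :=
  ∀ p ∈ ps, ∀ q ∈ ps, p.1 = q.1 → p.2 = q.2

theorem char_toNat_lt (c : Char) : c.toNat < 1114112 := by
  have h := c.valid
  unfold UInt32.isValidChar Nat.isValidChar at h
  simp only [Char.toNat]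
  omega

theorem char_eq_of_toNat_eq {a b : Char} (h : a.toNat = b.toNat) : a = b :=
  Char.ext (UInt32.toNat_inj.mp h)

-- from x ≤_key y ≤_key q and x.1 = q.1 conclude y.1 = x.1 (lexicographic key)
theorem fst_eq_of_key_between {x y q : Char × Char} (h1 : pairKey x ≤ pairKey y)
    (h2 : pairKey y ≤ pairKey q) (hfst : x.1 = q.1) : y.1 = x.1 := by
  unfold pairKey at h1 h2
  have b1 := char_toNat_lt x.2
  have b2 := char_toNat_lt y.2
  have b3 := char_toNat_lt q.2
  apply char_eq_of_toNat_eq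
  have hq : q.1.toNat = x.1.toNat := by rw [hfst]
  omega

theorem card_insert_erase (s : Finset Char) (x : Char) :
    (insert x s).card = (s.erase x).card + 1 := by
  have h : insert x (s.erase x) = insert x s := by
    apply Finset.ext; intro y
    simp [Finset.mem_insert, Finset.mem_erase]
    tauto
  rw [← h]
  exact Finset.card_insert_of_notMem (by simp)

theorem ofList_sublist {α : Type} [BEq α] [LawfulBEq α] (L : List α) :
    (PySem.Set.ofList L).Sublist L := by
  induction L with
  | nil => simp [PySem.Set.ofList_nil]
  | cons x xs ih =>
    rw [PySem.Set.ofList_cons]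
    have hf : (PySem.Set.discard (PySem.Set.ofList xs) x).Sublist (PySem.Set.ofList xs) := by
      unfold PySem.Set.discard; exact List.filter_sublist
    exact List.Sublist.cons₂ x (hf.trans ih)

theorem ofList_length_lt {α : Type} [BEq α] [LawfulBEq α] (L : List α) (h : ¬ L.Nodup) :
    (PySem.Set.ofList L).length < L.length := by
  rcases Nat.lt_or_ge (PySem.Set.ofList L).length L.length with hlt | hge
  · exact hlt
  · exfalso
    have hle := (ofList_sublist L).length_le
    have heq := (ofList_sublist L).eq_of_length (Nat.le_antisymm hle hge)
    exact h (heq ▸ PySem.Set.nodup_ofList L)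

theorem ofList_middle {α : Type} [BEq α] [LawfulBEq α] {p : α} {xs : List α} (ys : List α)
    (hp : p ∈ xs) : PySem.Set.ofList (xs ++ p :: ys) = PySem.Set.ofList (xs ++ ys) := by
  rw [PySem.Set.ofList_append, PySem.Set.ofList_append, PySem.Set.update_cons,
    PySem.Set.add_of_mem ((PySem.Set.mem_ofList xs p).2 hp)]

theorem loop_eq_altCore (ps : List (Char × Char)) :
    ∀ (d : PySem.Dict Char Char), d.keys.Nodup →
    canConvertLoop ps d (PySem.Set.ofList (d.items.map Prod.snd)) = altCore (d.items ++ ps) := by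
  induction ps with
  | nil =>
    intro d hnd
    have hitems : d.items.Nodup := List.Nodup.of_map _ hnd
    have hof : PySem.Set.ofList d.items = d.items := PySem.Set.ofList_eq_self_of_nodup _ hitems
    have hfst : (d.items.map Prod.fst).Nodup := hnd
    simp only [canConvertLoop, altCore, List.append_nil, hof,
      PySem.Set.ofList_eq_self_of_nodup _ hfst, PySem.Set.len, List.length_map, ne_eq,
      not_true_eq_false, if_false]
    rfl
  | cons p rest ih =>
    intro d hnd
    obtain ⟨a, b⟩ := p
    show canConvertLoop ((a, b) :: rest) d _ = _
    rw [canConvertLoop]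
    cases h : d.get? a with
    | none =>
      have hcon : d.contains a = false := by
        rw [PySem.Dict.contains_eq_isSome_get?, h]; rfl
      have hitems := PySem.Dict.items_insert_of_not_contains d b hcon
      have huniq : PySem.Set.add (PySem.Set.ofList (d.items.map Prod.snd)) b
          = PySem.Set.ofList ((d.insert a b).items.map Prod.snd) := by
        rw [hitems, List.map_append, List.map_cons, List.map_nil,
          PySem.Set.ofList_append_singleton]
      rw [huniq, ih (d.insert a b) (PySem.Dict.nodup_keys_insert d a b hnd), hitems,
        List.append_assoc, List.singleton_append]
    | some c =>
      have hmem : (a, c) ∈ d.items := PySem.Dict.mem_items_of_get?_eq_some d h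
      by_cases hc : c = b
      · subst hc
        simp only [ne_eq, not_true_eq_false, if_false]
        rw [ih d hnd]
        unfold altCore
        rw [ofList_middle rest hmem]
      · simp only [ne_eq, hc, not_false_eq_true, if_true]
        unfold altCore
        have hab : (a, b) ∈ PySem.Set.ofList (d.items ++ (a, b) :: rest) := by
          rw [PySem.Set.mem_ofList]
          exact List.mem_append_right _ (List.mem_cons_self ..)
        have hac : (a, c) ∈ PySem.Set.ofList (d.items ++ (a, b) :: rest) := by
          rw [PySem.Set.mem_ofList]
          exact List.mem_append_left _ hmem
        have hnn : ¬ ((PySem.Set.ofList (d.items ++ (a, b) :: rest)).map Prod.fst).Nodup := by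
          intro hn
          have := List.inj_on_of_nodup_map hn hac hab rfl
          exact hc (congrArg Prod.snd this)
        have hlt := ofList_length_lt _ hnn
        rw [List.length_map] at hlt
        simp only [PySem.Set.len, ne_eq]
        rw [if_pos]
        omega

theorem canConvert_eq_altCore (s1 s2 : List Char) :
    canConvertLoop (List.zip s1 s2) PySem.Dict.empty PySem.Set.empty = altCore (List.zip s1 s2) := by
  have h := loop_eq_altCore (List.zip s1 s2) PySem.Dict.empty PySem.Dict.nodup_keys_empty
  simpa using h

-- |set(L)| is the cardinality of L's finset of elements
theorem len_ofList_eq_card {α : Type} [BEq α] [LawfulBEq α] [DecidableEq α] (L : List α) :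
    (PySem.Set.ofList L).length = L.toFinset.card := by
  have hnd : (PySem.Set.ofList L).Nodup := PySem.Set.nodup_ofList L
  have hfs : (PySem.Set.ofList L : List α).toFinset = L.toFinset := by
    apply Finset.ext
    intro x
    simp [List.mem_toFinset, PySem.Set.mem_ofList]
  rw [← hfs, List.toFinset_card_of_nodup hnd]

-- altCore's cardinality test detects exactly non-functionality
theorem condA_iff_not_func (ps : List (Char × Char)) :
    (PySem.Set.ofList ps).length ≠ ((PySem.Set.ofList ((PySem.Set.ofList ps).map Prod.fst)) : List Char).length
      ↔ ¬ Func ps := by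
  have hmemL : ∀ p, p ∈ (PySem.Set.ofList ps : List (Char × Char)) ↔ p ∈ ps :=
    fun p => PySem.Set.mem_ofList ps p
  have hnd : (PySem.Set.ofList ps : List (Char × Char)).Nodup := PySem.Set.nodup_ofList ps
  constructor
  · intro hne hfunc
    apply hne
    have hinj : ∀ x ∈ (PySem.Set.ofList ps : List (Char × Char)),
        ∀ y ∈ (PySem.Set.ofList ps : List (Char × Char)), x.1 = y.1 → x = y := by
      intro x hx y hy hxy
      have := hfunc x ((hmemL x).1 hx) y ((hmemL y).1 hy) hxy
      exact Prod.ext hxy this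
    have hmn : ((PySem.Set.ofList ps : List (Char × Char)).map Prod.fst).Nodup :=
      List.Nodup.map_on hinj hnd
    rw [PySem.Set.ofList_eq_self_of_nodup _ hmn, List.length_map]
  · intro hnf
    unfold Func at hnf
    push Not at hnf
    obtain ⟨p, hp, q, hq, h1, h2⟩ := hnf
    have hpL := (hmemL p).2 hp
    have hqL := (hmemL q).2 hq
    have hnn : ¬ ((PySem.Set.ofList ps : List (Char × Char)).map Prod.fst).Nodup := by
      intro hn
      exact h2 (congrArg Prod.snd (List.inj_on_of_nodup_map hn hpL hqL h1))
    have hlt := ofList_length_lt _ hnn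
    rw [List.length_map] at hlt
    omega

theorem func_of_adjConflict_false (L : List (Char × Char))
    (hs : L.Pairwise (fun a b => pairKey a ≤ pairKey b)) (h : adjConflict L = false) : Func L := by
  induction L with
  | nil => intro p hp; simp at hp
  | cons x t ih =>
    match t, ih with
    | [], _ =>
      intro p hp q hq h1
      simp only [List.mem_singleton] at hp hq
      rw [hp, hq]
    | y :: t', ih =>
      rw [adjConflict] at h
      by_cases hc : (x.1 == y.1 && x.2 != y.2) = true
      · rw [if_pos hc] at h; exact absurd h (by simp)
      · rw [if_neg hc] at h
        have hs' : (y :: t').Pairwise (fun a b => pairKey a ≤ pairKey b) := hs.tail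
        have hft := ih hs' h
        have hxy : pairKey x ≤ pairKey y := (List.pairwise_cons.1 hs).1 y (List.mem_cons_self ..)
        simp only [beq_iff_eq, bne_iff_ne, Bool.and_eq_true, ne_eq, not_and, not_not] at hc
        have key : ∀ q ∈ y :: t', q.1 = x.1 → x.2 = q.2 := by
          intro q hq hq1
          have hyq : pairKey y ≤ pairKey q := by
            rcases List.mem_cons.1 hq with hq' | hq'
            · rw [hq']
            · exact (List.pairwise_cons.1 hs').1 q hq'
          have hy1 : y.1 = x.1 := fst_eq_of_key_between hxy hyq hq1.symm
          have hy2 : x.2 = y.2 := hc hy1.symm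
          calc x.2 = y.2 := hy2
            _ = q.2 := hft y (List.mem_cons_self ..) q hq (hy1.trans hq1.symm)
        intro p hp q hq h1
        rcases List.mem_cons.1 hp with hp' | hp' <;> rcases List.mem_cons.1 hq with hq' | hq'
        · rw [hp', hq']
        · subst hp'; exact key q hq' h1.symm
        · subst hq'; exact (key p hp' h1).symm
        · exact hft p hp' q hq' h1

theorem not_func_of_adjConflict_true (L : List (Char × Char)) (h : adjConflict L = true) :
    ¬ Func L := by
  induction L with
  | nil => simp [adjConflict] at h
  | cons x t ih =>
    match t, ih with
    | [], _ => simp [adjConflict] at h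
    | y :: t', ih =>
      rw [adjConflict] at h
      by_cases hc : (x.1 == y.1 && x.2 != y.2) = true
      · intro hf
        simp only [beq_iff_eq, bne_iff_ne, Bool.and_eq_true, ne_eq] at hc
        exact hc.2 (hf x (List.mem_cons_self ..) y
          (List.mem_cons_of_mem _ (List.mem_cons_self ..)) hc.1)
      · rw [if_neg hc] at h
        intro hf
        exact ih h (fun p hp q hq => hf p (List.mem_cons_of_mem _ hp) q (List.mem_cons_of_mem _ hq))

theorem countLoop_aux (l : List Char) : l.Pairwise (· ≤ ·) →
    ∀ (p : Char), (∀ x ∈ l, p ≤ x) → ∀ (d : Int),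
    countLoop d (some p) l = d + ((l.toFinset.erase p).card : Int) := by
  induction l with
  | nil => intro _ p _ d; simp [countLoop]
  | cons x r ih =>
    intro hs p hge d
    rw [countLoop]
    have hr := ih hs.tail x (fun y hy => (List.pairwise_cons.1 hs).1 y hy)
    by_cases hpx : p = x
    · subst hpx
      rw [if_pos (by simp), hr d]
      congr 2
      rw [List.toFinset_cons, Finset.erase_insert_eq_erase]
    · rw [if_neg (by simp [hpx]), hr (d + 1)]
      have hlt : p < x := lt_of_le_of_ne (hge x (List.mem_cons_self ..)) hpx
      have hpn : p ∉ (x :: r).toFinset := by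
        simp only [List.mem_toFinset]
        intro hmem
        rcases List.mem_cons.1 hmem with h | h
        · exact hpx h
        · exact absurd ((List.pairwise_cons.1 hs).1 p h) (not_le.2 hlt)
      rw [Finset.erase_eq_of_notMem hpn, List.toFinset_cons, card_insert_erase]
      push_cast
      ring

theorem countLoop_sorted (l : List Char) (hs : l.Pairwise (· ≤ ·)) :
    countLoop 0 none l = (l.toFinset.card : Int) := by
  cases l with
  | nil => simp [countLoop]
  | cons b r =>
    rw [countLoop, if_neg (by simp)]
    norm_num
    rw [countLoop_aux r hs.tail b (fun y hy => (List.pairwise_cons.1 hs).1 y hy) 1]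
    rw [card_insert_erase]
    push_cast
    ring

theorem altCore_eq_bCore (ps : List (Char × Char)) : altCore ps = bCore ps := by
  unfold altCore bCore
  have hperm := PySem.List.sorted_perm ps pairKey false
  have hpw := PySem.List.sorted_pairwise ps pairKey
  have hfuncS : Func (PySem.List.sorted ps pairKey false) ↔ Func ps := by
    constructor <;> intro h p hp q hq
    · exact h p (hperm.mem_iff.2 hp) q (hperm.mem_iff.2 hq)
    · exact h p (hperm.mem_iff.1 hp) q (hperm.mem_iff.1 hq)
  by_cases hf : Func ps
  · have hadj : adjConflict (PySem.List.sorted ps pairKey false) = false := by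
      cases h : adjConflict (PySem.List.sorted ps pairKey false)
      · rfl
      · exact absurd (hfuncS.2 hf) (not_func_of_adjConflict_true _ h)
    have hcond := (condA_iff_not_func ps).not.2 (not_not_intro hf)
    rw [not_not] at hcond
    simp only [PySem.Set.len, hadj, Bool.false_eq_true, if_false, ne_eq, hcond,
      not_true_eq_false]
    set T := PySem.List.sorted ((PySem.List.sorted ps pairKey false).map Prod.snd)
      (fun b => b) false with hT
    have hTpw : T.Pairwise (· ≤ ·) := PySem.List.sorted_pairwise _ _
    rw [countLoop_sorted T hTpw]
    have hTfs : T.toFinset = (ps.map Prod.snd).toFinset := by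
      rw [List.toFinset_eq_of_perm _ _ (PySem.List.sorted_perm _ _ _),
        List.toFinset_eq_of_perm _ _ (hperm.map Prod.snd)]
    have hsndfs : ((PySem.Set.ofList ps).map Prod.snd).toFinset = (ps.map Prod.snd).toFinset := by
      apply Finset.ext; intro b
      simp only [List.mem_toFinset, List.mem_map]
      constructor
      · rintro ⟨p, hp, rfl⟩; exact ⟨p, (PySem.Set.mem_ofList ps p).1 hp, rfl⟩
      · rintro ⟨p, hp, rfl⟩; exact ⟨p, (PySem.Set.mem_ofList ps p).2 hp, rfl⟩
    simp only [len_ofList_eq_card, hsndfs, hTfs]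
  · have hadj : adjConflict (PySem.List.sorted ps pairKey false) = true := by
      cases h : adjConflict (PySem.List.sorted ps pairKey false)
      · exact absurd (hfuncS.1 (func_of_adjConflict_false _ hpw h)) hf
      · rfl
    have hcond := (condA_iff_not_func ps).2 hf
    have hcond' : ¬ ((List.length (PySem.Set.ofList ps) : Int) =
        (List.length (PySem.Set.ofList ((PySem.Set.ofList ps).map Prod.fst)) : Int)) := by
      exact_mod_cast hcond
    simp only [PySem.Set.len, hadj, if_true, ne_eq]
    rw [if_pos hcond']

-- ===== VERDICT (by name: the statement is the Claim_ definition above) =====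
theorem canConvert_spec : Claim_equal_canConvert := by
  intro str1 str2 _
  unfold Spec_canConvert canConvert canConvert_alt
  by_cases h : str1 == str2
  · simp [h]
  · simp only [h, Bool.false_eq_true, if_false]
    rw [canConvert_eq_altCore str1.toList str2.toList, altCore_eq_bCore]
    rfl
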